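-- pv_equiv track=rewrite | github.com/GirlsFirst/SIP-2018 | U1-Fundamentals/U1.2-Python/obamicon/obamicon.py | obamicon
-- ===== SOURCE A (Python) =====
-- def obamicon(pixels):
--   # Define color constants to use for recoloring.
--   darkBlue = (0, 51, 76)
--   red = (217, 26, 33)
--   lightBlue = (112, 150, 158)
--   yellow = (252, 227, 166)
--
--   # Create a list to hold the new image pixel data.
--   new_pixels = []
--
--   # Process the pixels in the image.
--   for p in pixels:
--     # Pixel intensity = R value + G value + B value
--     intensity = p[0] + p[1] + p[2]
--
--     if intensity < 182:
--       new_pixels.append(darkBlue)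
--
--     elif intensity >= 182 and intensity < 364:
--       new_pixels.append(red)
--
--     elif intensity >= 364 and intensity < 546:
--       new_pixels.append(lightBlue)
--
--     elif intensity >=546:
--       new_pixels.append(yellow)
--
--   return new_pixels
-- ===== SOURCE B (Python) =====
-- def _bucket(thresholds, x):
--   # Binary search: number of thresholds <= x (bisect_right written by hand).
--   lo, hi = 0, len(thresholds)
--   while lo < hi:
--     mid = (lo + hi) // 2
--     if x < thresholds[mid]:
--       hi = mid
--     else:
--       lo = mid + 1
--   return lo
--
-- def obamicon(pixels):
--   # Bucket each pixel's intensity by binary search over the sorted thresholds,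
--   # then look the color up in a parallel table.
--   thresholds = [182, 364, 546]
--   colors = [(0, 51, 76), (217, 26, 33), (112, 150, 158), (252, 227, 166)]
--   return [colors[_bucket(thresholds, p[0] + p[1] + p[2])] for p in pixels]
-- ===== Notes on version B (the rewrite author's own statement) =====
-- stated objective: alternative
-- what changed: Replaced the if/elif threshold cascade with a hand-written binary search (bisect_right) over the sorted threshold list, indexing a parallel 4-entry color table.
import Mathlib
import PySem

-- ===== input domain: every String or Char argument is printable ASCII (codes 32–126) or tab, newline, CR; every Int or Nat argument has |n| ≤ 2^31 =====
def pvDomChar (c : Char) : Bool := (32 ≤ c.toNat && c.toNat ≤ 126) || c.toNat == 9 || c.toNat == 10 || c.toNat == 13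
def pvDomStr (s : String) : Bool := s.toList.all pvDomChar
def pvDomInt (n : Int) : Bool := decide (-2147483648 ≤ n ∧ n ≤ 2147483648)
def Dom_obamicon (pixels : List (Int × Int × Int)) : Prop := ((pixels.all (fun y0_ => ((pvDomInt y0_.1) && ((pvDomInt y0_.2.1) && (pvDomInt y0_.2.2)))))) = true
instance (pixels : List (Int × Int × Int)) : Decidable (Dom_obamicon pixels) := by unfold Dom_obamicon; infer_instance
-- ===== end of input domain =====

-- B replaces A's if/elif threshold cascade by a hand-written binary search (bisect_right)
-- over the sorted threshold list with a parallel color table (objective: alternative algorithm).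


-- ===== PORT A =====
-- literal transliteration of A's loop: fold appending via the if/elif cascade
def obamicon (pixels : List (Int × Int × Int)) : List (Int × Int × Int) :=
  let darkBlue : Int × Int × Int := (0, 51, 76)
  let red : Int × Int × Int := (217, 26, 33)
  let lightBlue : Int × Int × Int := (112, 150, 158)
  let yellow : Int × Int × Int := (252, 227, 166)
  pixels.foldl (fun new_pixels p =>
    let intensity := p.1 + p.2.1 + p.2.2
    if intensity < 182 then new_pixels ++ [darkBlue]
    else if intensity ≥ 182 ∧ intensity < 364 then new_pixels ++ [red]
    else if intensity ≥ 364 ∧ intensity < 546 then new_pixels ++ [lightBlue]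
    else if intensity ≥ 546 then new_pixels ++ [yellow]
    else new_pixels) []

-- ===== PORT B =====
-- literal transliteration of Source B's _bucket: the while loop becomes recursion on (lo, hi)
def pvBucket (thresholds : List Int) (x : Int) (lo hi : Nat) : Nat :=
  if lo < hi then
    let mid := (lo + hi) / 2
    if x < thresholds.getD mid 0 then pvBucket thresholds x lo mid
    else pvBucket thresholds x (mid + 1) hi
  else lo
termination_by hi - lo
decreasing_by all_goals omega

-- literal transliteration of Source B's obamicon: comprehension, binary-searched index into the table
def obamicon_alt (pixels : List (Int × Int × Int)) : List (Int × Int × Int) :=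
  let thresholds : List Int := [182, 364, 546]
  let colors : List (Int × Int × Int) := [(0, 51, 76), (217, 26, 33), (112, 150, 158), (252, 227, 166)]
  pixels.map (fun p =>
    colors.getD (pvBucket thresholds (p.1 + p.2.1 + p.2.2) 0 thresholds.length) (0, 0, 0))

-- ===== PRECONDITION & SPEC =====
def Spec_obamicon (pixels : List (Int × Int × Int)) (out : List (Int × Int × Int)) : Prop := out = obamicon_alt pixels
instance (pixels : List (Int × Int × Int)) (out : List (Int × Int × Int)) : Decidable (Spec_obamicon pixels out) := by unfold Spec_obamicon; infer_instance

-- ===== CLAIM (what is proved, stated in full; the proofs are below) =====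
def Claim_equal_obamicon : Prop := ∀ (pixels : List (Int × Int × Int)), Dom_obamicon pixels → Spec_obamicon pixels (obamicon pixels)

-- ===== LEMMAS AND PROOFS =====

-- the per-pixel color A's cascade selects
def cascadeColor (i : Int) : Int × Int × Int :=
  if i < 182 then (0, 51, 76)
  else if i ≥ 182 ∧ i < 364 then (217, 26, 33)
  else if i ≥ 364 ∧ i < 546 then (112, 150, 158)
  else (252, 227, 166)

lemma pvBucket_eval (x : Int) :
    pvBucket [182, 364, 546] x 0 3 =
      if x < 182 then 0 else if x < 364 then 1 else if x < 546 then 2 else 3 := by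
  by_cases h1 : x < 182 <;> by_cases h2 : x < 364 <;> by_cases h3 : x < 546 <;>
    first
      | omega
      | (simp [pvBucket, h1, h2, h3])

lemma bucket_color_eq (i : Int) :
    ([(0, 51, 76), (217, 26, 33), (112, 150, 158), (252, 227, 166)] : List (Int × Int × Int)).getD
      (pvBucket [182, 364, 546] i 0 3) (0, 0, 0) = cascadeColor i := by
  rw [pvBucket_eval]
  unfold cascadeColor
  split_ifs <;> first | rfl | omega

-- A's fold step written with the cascade color
lemma cascade_step (acc : List (Int × Int × Int)) (i : Int) :
    (if i < 182 then acc ++ [((0:Int), (51:Int), (76:Int))]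
     else if i ≥ 182 ∧ i < 364 then acc ++ [(217, 26, 33)]
     else if i ≥ 364 ∧ i < 546 then acc ++ [(112, 150, 158)]
     else if i ≥ 546 then acc ++ [(252, 227, 166)]
     else acc) = acc ++ [cascadeColor i] := by
  unfold cascadeColor; split_ifs <;> first | rfl | omega

-- A's fold with an arbitrary accumulator is the accumulator followed by the mapped cascade colors
lemma foldl_cascade (l : List (Int × Int × Int)) (acc : List (Int × Int × Int)) :
    l.foldl (fun new_pixels p =>
      let intensity := p.1 + p.2.1 + p.2.2
      if intensity < 182 then new_pixels ++ [((0:Int), (51:Int), (76:Int))]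
      else if intensity ≥ 182 ∧ intensity < 364 then new_pixels ++ [(217, 26, 33)]
      else if intensity ≥ 364 ∧ intensity < 546 then new_pixels ++ [(112, 150, 158)]
      else if intensity ≥ 546 then new_pixels ++ [(252, 227, 166)]
      else new_pixels) acc
    = acc ++ l.map (fun p => cascadeColor (p.1 + p.2.1 + p.2.2)) := by
  induction l generalizing acc with
  | nil => simp
  | cons p t ih =>
    simp only [List.foldl_cons, List.map_cons]
    rw [cascade_step, ih, List.append_assoc, List.singleton_append]

-- ===== VERDICT (by name: the statement is the Claim_ definition above) =====
theorem obamicon_spec : Claim_equal_obamicon := by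
  intro pixels _
  unfold Spec_obamicon obamicon obamicon_alt
  rw [foldl_cascade, List.nil_append]
  exact List.map_congr_left (fun p _ => (bucket_color_eq _).symm)
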